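-- pv_equiv track=rewrite | github.com/cdjasonj/datagrand | outputs/result_process.py | _get_free_text
-- ===== SOURCE A (Python) =====
-- def _get_free_text(text, label):
--     # 将文本中没有在BIO中出现的文本提取出来
--     free_text = []
--     temp = []
--     for idx, char in enumerate(text):
--
--         if label[idx] == 'O':
--             temp.append(char)
--         elif temp:
--             free_text.append('_'.join(temp))
--             temp = []
--     if temp:
--         free_text.append('_'.join(temp))
--     return free_text
-- ===== SOURCE B (Python) =====
-- def _get_free_text(text, label):
--     # Run-partitioning: precompute which positions are 'O', then scan run by run
--     # with two indices, slicing each maximal 'O'-run out of text directly.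
--     n = len(text)
--     keys = [label[i] == 'O' for i in range(n)]
--     out = []
--     i = 0
--     while i < n:
--         if keys[i]:
--             j = i + 1
--             while j < n and keys[j]:
--                 j += 1
--             out.append('_'.join(text[i:j]))
--             i = j
--         else:
--             i += 1
--     return out
-- ===== Notes on version B (the rewrite author's own statement) =====
-- stated objective: alternative
-- what changed: Replaces A's char-by-char temp-buffer state machine (append/flush with a trailing flush) by a precomputed boolean key list and a two-pointer run scan that joins each maximal 'O'-run sliced from text.
import Mathlib
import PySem

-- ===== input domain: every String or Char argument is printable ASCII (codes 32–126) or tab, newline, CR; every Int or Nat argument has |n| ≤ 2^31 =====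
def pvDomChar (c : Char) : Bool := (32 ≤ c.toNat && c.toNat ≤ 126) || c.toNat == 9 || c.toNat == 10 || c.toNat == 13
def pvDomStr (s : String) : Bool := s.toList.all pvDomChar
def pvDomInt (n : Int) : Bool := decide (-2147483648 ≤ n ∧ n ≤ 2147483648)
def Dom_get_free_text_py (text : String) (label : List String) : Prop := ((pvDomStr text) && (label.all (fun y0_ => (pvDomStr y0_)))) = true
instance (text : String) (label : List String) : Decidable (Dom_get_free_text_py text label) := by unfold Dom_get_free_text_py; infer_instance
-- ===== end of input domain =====

-- B replaces A's temp-buffer flush state machine with a key list + two-pointer run scan; same cost, alternative structure.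

-- '_'.join of a list of 1-char strings (both Pythons join runs of chars with '_')
def pvJoin (temp : List Char) : String :=
  String.ofList (PySem.Chars.join ['_'] (temp.map (fun c => [c])))

-- ===== PORT A =====
-- final 'if temp: free_text.append(...)'
def pvAFin (st : List String × List Char) : List String :=
  if st.2.isEmpty then st.1 else st.1 ++ [pvJoin st.2]

-- the 'for idx, char in enumerate(text)' loop, carrying (free_text, temp)
def pvALoop (label : List String) : List Char → Int → List String × List Char → List String × List Char
  | [], _, st => st
  | c :: cs, idx, (free, temp) =>
    match PySem.List.pyGet? label idx with
    | none => (free, temp)  -- Python raises IndexError here; excluded by Pre_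
    | some l =>
      if l == "O" then pvALoop label cs (idx + 1) (free, temp ++ [c])
      else if temp.isEmpty then pvALoop label cs (idx + 1) (free, temp)
      else pvALoop label cs (idx + 1) (free ++ [pvJoin temp], [])

def get_free_text_py (text : String) (label : List String) : List String :=
  pvAFin (pvALoop label text.toList 0 ([], []))

-- ===== PORT B =====
-- inner 'while j < n and keys[j]: j += 1'
def pvBRun (keys : List Bool) (n : Nat) (j : Nat) : Nat :=
  if h : j < n ∧ keys.getD j false = true then pvBRun keys n (j + 1) else j
termination_by n - j
decreasing_by omega

theorem le_pvBRun (keys : List Bool) (n : Nat) : ∀ j, j ≤ pvBRun keys n j := by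
  intro j
  induction j using pvBRun.induct keys n with
  | case1 j h ih => rw [pvBRun, dif_pos h]; omega
  | case2 j h => rw [pvBRun, dif_neg h]

-- outer 'while i < n' loop
def pvBScan (cs : List Char) (keys : List Bool) (n : Nat) (i : Nat) (out : List String) : List String :=
  if h : i < n then
    if keys.getD i false then
      let j := pvBRun keys n (i + 1)
      pvBScan cs keys n j (out ++ [pvJoin (PySem.List.slice cs (some (i : Int)) (some (j : Int)))])
    else pvBScan cs keys n (i + 1) out
  else out
termination_by n - i
decreasing_by
  · have := le_pvBRun keys n (i + 1); omega
  · omega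

def get_free_text_py_alt (text : String) (label : List String) : List String :=
  let cs := text.toList
  let n := cs.length
  -- keys = [label[i] == 'O' for i in range(n)]; pyGet? = none is Python's IndexError, excluded by Pre_
  let keys := (PySem.List.pyRange 0 (n : Int) 1).map (fun i => PySem.List.pyGet? label i == some "O")
  pvBScan cs keys n 0 []

-- ===== PRECONDITION & SPEC =====
-- A (and B) raise IndexError when label is shorter than text; exactly those inputs are excluded.
def Pre_get_free_text_py (text : String) (label : List String) : Prop :=
  text.toList.length ≤ label.length
instance (text : String) (label : List String) : Decidable (Pre_get_free_text_py text label) := by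
  unfold Pre_get_free_text_py; infer_instance

def pvWitness_get_free_text_py : String × List String := ("ab c", ["O", "O", "B", "O", "I"])

def Spec_get_free_text_py (text : String) (label : List String) (out : List String) : Prop :=
  out = get_free_text_py_alt text label
instance (text : String) (label : List String) (out : List String) : Decidable (Spec_get_free_text_py text label out) := by
  unfold Spec_get_free_text_py; infer_instance

-- ===== CLAIM (what is proved, stated in full; the proofs are below) =====
def Claim_equal_get_free_text_py : Prop := ∀ (text : String) (label : List String), Dom_get_free_text_py text label → Pre_get_free_text_py text label → Spec_get_free_text_py text label (get_free_text_py text label)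

-- ===== LEMMAS AND PROOFS =====

-- reference function both ports are reduced to: pending run 'temp', then the (char, is-'O') stream
def pvRef : List Char → List (Char × Bool) → List String
  | temp, [] => if temp.isEmpty then [] else [pvJoin temp]
  | temp, (c, k) :: zs =>
    if k then pvRef (temp ++ [c]) zs
    else if temp.isEmpty then pvRef temp zs
    else pvJoin temp :: pvRef [] zs

theorem pvALoop_eq (label : List String) :
    ∀ (cs : List Char) (k : Nat) (free : List String) (temp : List Char),
      k + cs.length ≤ label.length →
      pvAFin (pvALoop label cs (k : Int) (free, temp)) =
        free ++ pvRef temp (cs.zip ((label.drop k).map (fun l => l == "O"))) := by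
  intro cs
  induction cs with
  | nil =>
    intro k free temp _
    simp only [pvALoop, pvAFin, List.zip_nil_left, pvRef]
    by_cases h : temp.isEmpty <;> simp [h]
  | cons c cs ih =>
    intro k free temp hk
    have hklt : k < label.length := by simp at hk; omega
    have hget : PySem.List.pyGet? label (k : Int) = some label[k] := by
      simp [PySem.List.pyGet?_natCast, List.getElem?_eq_getElem hklt]
    have hdrop : label.drop k = label[k] :: label.drop (k + 1) :=
      List.drop_eq_getElem_cons hklt
    have hcast : (k : Int) + 1 = ((k + 1 : Nat) : Int) := by push_cast; ring
    simp only [pvALoop, hget, hdrop, List.map_cons, List.zip_cons_cons, pvRef, hcast]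
    cases hO : (label[k] == "O") with
    | true =>
      simp only [if_true]
      exact ih (k + 1) free (temp ++ [c]) (by simp at hk ⊢; omega)
    | false =>
      simp only [Bool.false_eq_true, if_false]
      cases ht : temp.isEmpty with
      | true =>
        simp only [if_true]
        exact ih (k + 1) free temp (by simp at hk ⊢; omega)
      | false =>
        simp only [Bool.false_eq_true, if_false]
        rw [ih (k + 1) (free ++ [pvJoin temp]) [] (by simp at hk ⊢; omega)]
        simp
theorem pvZip_takeWhile_map :
    ∀ (as : List Char) (bs : List Bool),
      ((as.zip bs).takeWhile (fun p => p.2)).map (fun p => p.1) =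
        as.take ((bs.takeWhile id).length) := by
  intro as
  induction as with
  | nil => intro bs; simp
  | cons a as ih =>
    intro bs
    cases bs with
    | nil => simp
    | cons b bs =>
      cases b <;> simp [List.takeWhile, ih, id]

theorem pvZip_dropWhile :
    ∀ (as : List Char) (bs : List Bool),
      (as.zip bs).dropWhile (fun p => p.2) =
        (as.drop ((bs.takeWhile id).length)).zip (bs.drop ((bs.takeWhile id).length)) := by
  intro as
  induction as with
  | nil => intro bs; simp
  | cons a as ih =>
    intro bs
    cases bs with
    | nil => simp
    | cons b bs =>
      cases b <;> simp [List.takeWhile, ih, id]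

theorem pvRef_flush :
    ∀ (zs : List (Char × Bool)) (temp : List Char), temp.isEmpty = false →
      pvRef temp zs =
        pvJoin (temp ++ (zs.takeWhile (fun p => p.2)).map (fun p => p.1)) ::
          pvRef [] (zs.dropWhile (fun p => p.2)) := by
  intro zs
  induction zs with
  | nil => intro temp ht; simp [pvRef, ht]
  | cons z zs ih =>
    intro temp ht
    obtain ⟨c, k⟩ := z
    cases k with
    | true =>
      simp only [pvRef, if_true, List.takeWhile, List.dropWhile]
      rw [ih (temp ++ [c]) (by simp)]
      simp
    | false =>
      simp [pvRef, ht, List.takeWhile, List.dropWhile]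

theorem pvBRun_eq (keys : List Bool) :
    ∀ j, pvBRun keys (keys.length) j = j + (((keys.drop j).takeWhile id).length) := by
  intro j
  induction j using pvBRun.induct keys keys.length with
  | case1 j h ih =>
    obtain ⟨hj, hk⟩ := h
    have hkey : keys[j] = true := by rwa [List.getD_eq_getElem keys false hj] at hk
    have hdrop : keys.drop j = true :: keys.drop (j + 1) := by
      rw [List.drop_eq_getElem_cons hj, hkey]
    rw [pvBRun, dif_pos ⟨hj, hk⟩, ih, hdrop]
    simp [List.takeWhile, id]
    omega
  | case2 j h =>
    rw [pvBRun, dif_neg h]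
    by_cases hj : j < keys.length
    · have hk : keys.getD j false = false := by
        rcases Bool.eq_false_or_eq_true (keys.getD j false) with h' | h'
        · exact absurd ⟨hj, h'⟩ h
        · exact h'
      have hkey : keys[j] = false := by rwa [List.getD_eq_getElem keys false hj] at hk
      have hdrop : keys.drop j = false :: keys.drop (j + 1) := by
        rw [List.drop_eq_getElem_cons hj, hkey]
      rw [hdrop]; simp [List.takeWhile, id]
    · rw [List.drop_eq_nil_of_le (by omega)]; simp

theorem pvBScan_eq (cs : List Char) (keys : List Bool) (hlen : keys.length = cs.length) :
    ∀ (d i : Nat) (out : List String), cs.length - i ≤ d →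
      pvBScan cs keys (cs.length) i out = out ++ pvRef [] ((cs.drop i).zip (keys.drop i)) := by
  intro d
  induction d with
  | zero =>
    intro i out hd
    rw [pvBScan, dif_neg (by omega)]
    rw [List.drop_eq_nil_of_le (by omega), List.zip_nil_left, pvRef]
    simp
  | succ d ihd =>
    intro i out hd
    by_cases h : i < cs.length
    · have hcs : cs.drop i = cs[i] :: cs.drop (i + 1) := List.drop_eq_getElem_cons h
      cases hk : keys.getD i false with
      | false =>
        have hkey : keys[i]'(by omega) = false := by
          rwa [List.getD_eq_getElem keys false (by omega)] at hk
        have hks : keys.drop i = false :: keys.drop (i + 1) := by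
          rw [List.drop_eq_getElem_cons (show i < keys.length by omega), hkey]
        rw [pvBScan, dif_pos h]
        simp only [hk, Bool.false_eq_true, if_false]
        rw [ihd (i + 1) out (by omega), hcs, hks, List.zip_cons_cons, pvRef]
        simp
      | true =>
        have hkey : keys[i]'(by omega) = true := by
          rwa [List.getD_eq_getElem keys false (by omega)] at hk
        have hks : keys.drop i = true :: keys.drop (i + 1) := by
          rw [List.drop_eq_getElem_cons (show i < keys.length by omega), hkey]
        have hj : pvBRun keys cs.length (i + 1) =
            (i + 1) + (((keys.drop (i + 1)).takeWhile id).length) := by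
          rw [← hlen]; exact pvBRun_eq keys (i + 1)
        set m := ((keys.drop (i + 1)).takeWhile id).length with hm
        rw [pvBScan, dif_pos h]
        simp only [hk, if_true]
        rw [hj, ihd ((i + 1) + m) _ (by omega)]
        have hslice : PySem.List.slice cs (some (i : Int)) (some (((i + 1) + m : Nat) : Int)) =
            cs[i] :: (cs.drop (i + 1)).take m := by
          rw [PySem.List.slice_natCast]
          rw [show (i + 1) + m - i = m + 1 from by omega, hcs, List.take_succ_cons]
        rw [hcs, hks, List.zip_cons_cons, pvRef, if_pos rfl, List.nil_append]
        rw [pvRef_flush _ [cs[i]] (by simp)]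
        rw [pvZip_takeWhile_map, pvZip_dropWhile, ← hm, List.drop_drop, List.drop_drop]
        rw [hslice]
        simp
    · rw [pvBScan, dif_neg h]
      rw [List.drop_eq_nil_of_le (by omega), List.zip_nil_left, pvRef]
      simp

theorem pvZip_take_len : ∀ (as : List Char) (bs : List Bool), as.zip (bs.take as.length) = as.zip bs := by
  intro as
  induction as with
  | nil => intro bs; simp
  | cons a as ih =>
    intro bs
    cases bs with
    | nil => simp
    | cons b bs => simp [ih]

-- ===== VERDICT (by name: the statement is the Claim_ definition above) =====
theorem get_free_text_py_spec : Claim_equal_get_free_text_py := by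
  intro text label _ hpre
  unfold Spec_get_free_text_py get_free_text_py get_free_text_py_alt
  have hpre' : text.toList.length ≤ label.length := hpre
  set cs := text.toList with hcs
  set n := cs.length with hn
  -- A side
  have hA : pvAFin (pvALoop label cs ((0 : Nat) : Int) ([], [])) =
      [] ++ pvRef [] (cs.zip ((label.drop 0).map (fun l => l == "O"))) :=
    pvALoop_eq label cs 0 [] [] (by omega)
  -- B side: the key list is the mapped prefix of label
  have hkeys : (PySem.List.pyRange 0 (n : Int) 1).map
        (fun i => PySem.List.pyGet? label i == some "O") =
      ((label.map (fun l => l == "O")).take n) := by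
    apply List.ext_getElem
    · simp [PySem.List.pyRange_zero_natCast]; omega
    · intro t h1 h2
      have ht : t < n := by simpa [PySem.List.pyRange_zero_natCast] using h1
      have htl : t < label.length := by omega
      simp [PySem.List.pyRange_zero_natCast, PySem.List.pyGet?_natCast,
        List.getElem?_eq_getElem htl]
  have hklen : ((label.map (fun l => l == "O")).take n).length = n := by
    simp; omega
  have hB := pvBScan_eq cs ((label.map (fun l => l == "O")).take n)
      (by rw [hklen]) n 0 [] (by omega)
  norm_num at hA
  rw [hA]
  show pvRef [] (cs.zip (label.map (fun l => l == "O"))) =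
    pvBScan cs ((PySem.List.pyRange 0 (n : Int) 1).map
      (fun i => PySem.List.pyGet? label i == some "O")) n 0 []
  rw [hkeys, hn, hB]
  simp only [List.drop_zero, List.nil_append]
  rw [pvZip_take_len cs ((label.map (fun l => l == "O")))]
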